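-- pv_equiv track=rewrite | github.com/upcomingGit/Veda-advisor | scripts/fetch_news.py | classify_publisher_tier
-- ===== SOURCE A (Python) =====
-- TIER_2_PUBLISHER_DOMAINS = frozenset([
--     # India
--     "business-standard.com",
--     "livemint.com",
--     "economictimes.indiatimes.com",
--     "thehindu.com",
--     "hindustantimes.com",
--     "cnbctv18.com",
--     "indianexpress.com",
--     "moneycontrol.com",
--     # US / Global
--     "reuters.com",
--     "bloomberg.com",
--     "cnbc.com",
--     "finance.yahoo.com",
--     "yahoo.com",
--     "marketwatch.com",
--     "seekingalpha.com",
--     "wsj.com",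
--     "ft.com",
--     # Other commonly-trusted tier-2 publishers
--     "nytimes.com",
--     "washingtonpost.com",
--     "barrons.com",
--     "forbes.com",
--     "businessinsider.com",
-- ])
--
-- TIER_4_DROP_DOMAINS = frozenset([
--     "msn.com",
--     "news.google.com",
--     "flipboard.com",
--     "smartnews.com",
--     "tradingview.com",  # mostly user-generated
-- ])
--
-- def classify_publisher_tier(publisher: str) -> int:
--     """Return 2, 3, or 0 based on domain. 0 means drop."""
--     if not publisher:
--         return 0
--     if publisher in TIER_4_DROP_DOMAINS:
--         return 0
--     if publisher in TIER_2_PUBLISHER_DOMAINS: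
--         return 2
--     # Match subdomains of tier-2 publishers (e.g., "in.reuters.com" → reuters.com)
--     for tier_2_domain in TIER_2_PUBLISHER_DOMAINS:
--         if publisher.endswith("." + tier_2_domain):
--             return 2
--     return 3
-- ===== SOURCE B (Python) =====
-- TIER_2_PUBLISHER_DOMAINS = frozenset([
--     "business-standard.com",
--     "livemint.com",
--     "economictimes.indiatimes.com",
--     "thehindu.com",
--     "hindustantimes.com",
--     "cnbctv18.com",
--     "indianexpress.com",
--     "moneycontrol.com",
--     "reuters.com",
--     "bloomberg.com",
--     "cnbc.com",
--     "finance.yahoo.com",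
--     "yahoo.com",
--     "marketwatch.com",
--     "seekingalpha.com",
--     "wsj.com",
--     "ft.com",
--     "nytimes.com",
--     "washingtonpost.com",
--     "barrons.com",
--     "forbes.com",
--     "businessinsider.com",
-- ])
--
-- TIER_4_DROP_DOMAINS = frozenset([
--     "msn.com",
--     "news.google.com",
--     "flipboard.com",
--     "smartnews.com",
--     "tradingview.com",
-- ])
--
--
-- def _tier2_suffix(s: str) -> int:
--     """Walk the dot-aligned suffixes of s left to right, indexing into the set."""
--     if s in TIER_2_PUBLISHER_DOMAINS:
--         return 2
--     i = s.find(".")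
--     return 3 if i < 0 else _tier2_suffix(s[i + 1:])
--
--
-- def classify_publisher_tier(publisher: str) -> int:
--     """Return 2, 3, or 0 based on domain. 0 means drop."""
--     if not publisher:
--         return 0
--     if publisher in TIER_4_DROP_DOMAINS:
--         return 0
--     return _tier2_suffix(publisher)
-- ===== Notes on version B (the rewrite author's own statement) =====
-- stated objective: alternative
-- what changed: Instead of scanning all 22 tier-2 domains with an endswith test (plus a separate exact membership test), B walks the publisher's dot-aligned suffixes left to right, indexing each suffix into the tier-2 set; both tier-2 checks collapse into one pass over the input's own structure.
import Mathlib
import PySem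

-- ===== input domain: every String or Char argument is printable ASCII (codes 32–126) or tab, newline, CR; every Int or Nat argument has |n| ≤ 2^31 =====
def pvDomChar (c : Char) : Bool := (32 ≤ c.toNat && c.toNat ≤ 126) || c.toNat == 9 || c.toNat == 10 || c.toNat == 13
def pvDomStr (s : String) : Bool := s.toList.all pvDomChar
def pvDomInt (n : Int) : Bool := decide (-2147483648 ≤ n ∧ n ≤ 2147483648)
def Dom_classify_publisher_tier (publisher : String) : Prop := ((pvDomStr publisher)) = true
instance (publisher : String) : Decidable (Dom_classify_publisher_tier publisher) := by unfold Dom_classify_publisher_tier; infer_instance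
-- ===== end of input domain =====

-- B replaces A's scan of all 22 tier-2 domains with an endswith test by walking the
-- publisher's dot-aligned suffixes and looking each one up in the tier-2 set (objective: alternative).

-- ===== PORT A =====
-- the module constants (frozensets of distinct string literals)
def pvTier2List : List String := ["business-standard.com", "livemint.com",
  "economictimes.indiatimes.com", "thehindu.com", "hindustantimes.com", "cnbctv18.com",
  "indianexpress.com", "moneycontrol.com", "reuters.com", "bloomberg.com", "cnbc.com",
  "finance.yahoo.com", "yahoo.com", "marketwatch.com", "seekingalpha.com", "wsj.com",
  "ft.com", "nytimes.com", "washingtonpost.com", "barrons.com", "forbes.com",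
  "businessinsider.com"]
def pvDropList : List String := ["msn.com", "news.google.com", "flipboard.com",
  "smartnews.com", "tradingview.com"]
def pvTier2Set : PySem.Set String := PySem.Set.ofList pvTier2List
def pvDropSet : PySem.Set String := PySem.Set.ofList pvDropList

-- A: empty → 0; drop-set → 0; exact tier-2 → 2; loop over the tier-2 set testing
-- publisher.endswith("." + d) → 2; else 3.  (The loop's value is independent of the
-- frozenset's iteration order, so it is ported as a scan of the elements in source order.)
def classify_publisher_tier (publisher : String) : Int :=
  if publisher = "" then 0
  else if publisher ∈ pvDropSet then 0
  else if publisher ∈ pvTier2Set then 2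
  else if pvTier2List.any (fun d => PySem.Str.endswith publisher ("." ++ d)) then 2
  else 3

-- ===== PORT B =====
-- the tier-2 set on the code-point side (PySem.Str.* are wrappers over List Char)
def pvTier2Chars : List (List Char) := pvTier2List.map String.toList

-- termination helper for B's recursion: s.find('.') points inside s
theorem pvFind_dot_lt (s : List Char) (h0 : 0 ≤ PySem.Chars.find s ['.']) :
    (PySem.Chars.find s ['.']).toNat < s.length := by
  have hp := (PySem.Chars.find_spec h0).1
  have := hp.length_le
  simp [List.length_drop] at this
  omega

-- _tier2_suffix: if s in TIER_2 return 2; i = s.find('.'); 3 if i < 0 else recurse on s[i+1:]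
def pvTier2Suffix (s : List Char) : Int :=
  if s ∈ pvTier2Chars then 2
  else
    if h : PySem.Chars.find s ['.'] < 0 then 3
    else pvTier2Suffix (PySem.List.slice s (some (PySem.Chars.find s ['.'] + 1)) none)
termination_by s.length
decreasing_by
  have h0 : (0:Int) ≤ PySem.Chars.find s ['.'] := by omega
  have hlt := pvFind_dot_lt s h0
  rw [PySem.List.slice_from s (by omega)]
  simp [List.length_drop]
  omega

def classify_publisher_tier_alt (publisher : String) : Int :=
  if publisher = "" then 0
  else if publisher ∈ pvDropSet then 0
  else pvTier2Suffix publisher.toList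

-- ===== PRECONDITION & SPEC =====
def Spec_classify_publisher_tier (publisher : String) (out : Int) : Prop := out = classify_publisher_tier_alt publisher
instance (publisher : String) (out : Int) : Decidable (Spec_classify_publisher_tier publisher out) := by unfold Spec_classify_publisher_tier; infer_instance

-- ===== CLAIM (what is proved, stated in full; the proofs are below) =====
def Claim_equal_classify_publisher_tier : Prop := ∀ (publisher : String), Dom_classify_publisher_tier publisher → Spec_classify_publisher_tier publisher (classify_publisher_tier publisher)

-- ===== LEMMAS AND PROOFS =====

-- B's loop returns 2 exactly when some dot-aligned suffix of s is a tier-2 domain,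
-- i.e. s itself or a suffix preceded by a '.' equals some d ∈ pvTier2Chars.
theorem pvTier2Suffix_eq (s : List Char) :
    pvTier2Suffix s = if ∃ d ∈ pvTier2Chars, s = d ∨ ('.' :: d) <:+ s then 2 else 3 := by
  induction hn : s.length using Nat.strong_induction_on generalizing s with
  | _ n ih =>
  subst hn
  rw [pvTier2Suffix]
  by_cases hmem : s ∈ pvTier2Chars
  · rw [if_pos hmem, if_pos ⟨s, hmem, Or.inl rfl⟩]
  · rw [if_neg hmem]
    by_cases hneg : PySem.Chars.find s ['.'] < 0
    · -- no dot in s at all: no suffix '.'::d can occur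
      rw [dif_pos hneg]
      have hfe : PySem.Chars.find s ['.'] = -1 := by
        have := PySem.Chars.neg_one_le_find s ['.']
        omega
      have hni : ¬ (['.'] <:+: s) := (PySem.Chars.find_eq_neg_one_iff s ['.']).mp hfe
      have hcond : ¬ ∃ d ∈ pvTier2Chars, s = d ∨ ('.' :: d) <:+ s := by
        rintro ⟨d, hd, (rfl | hsuf)⟩
        · exact hmem hd
        · obtain ⟨t, ht⟩ := hsuf
          exact hni ⟨t, d, by simpa using ht⟩
      rw [if_neg hcond]
    · rw [dif_neg hneg]
      have h0 : (0:Int) ≤ PySem.Chars.find s ['.'] := by omega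
      set i : Nat := (PySem.Chars.find s ['.']).toNat with hi
      obtain ⟨hpre, hmin⟩ := PySem.Chars.find_spec h0
      obtain ⟨r, hr⟩ := hpre
      -- s.drop i = '.' :: r, and r = s.drop (i+1)
      have hdi : s.drop i = '.' :: r := by simpa using hr.symm
      have hr' : r = s.drop (i + 1) := by
        have h2 : (s.drop i).drop 1 = s.drop (i + 1) := by rw [List.drop_drop]
        rw [hdi] at h2
        simpa using h2
      have hlt : i < s.length := pvFind_dot_lt s h0
      have hslice : PySem.List.slice s (some (PySem.Chars.find s ['.'] + 1)) none
          = s.drop (i + 1) := by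
        rw [PySem.List.slice_from s (by omega)]
        congr 1
        omega
      rw [hslice]
      have hlen' : (s.drop (i + 1)).length < s.length := by
        simp [List.length_drop]; omega
      rw [ih _ hlen' _ rfl]
      -- the two conditions agree
      congr 1
      simp only [eq_iff_iff]
      constructor
      · rintro ⟨d, hd, (hds | hsuf)⟩
        · refine ⟨d, hd, Or.inr ?_⟩
          have hdd : ('.' :: d) = s.drop i := by rw [hdi, hr', hds]
          rw [hdd]
          exact List.drop_suffix i s
        · exact ⟨d, hd, Or.inr (hsuf.trans (List.drop_suffix (i + 1) s))⟩
      · rintro ⟨d, hd, (rfl | hsuf)⟩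
        · exact absurd hd hmem
        · obtain ⟨pre, hpreeq⟩ := hsuf
          have hdropp : s.drop pre.length = '.' :: d := by
            rw [← hpreeq]; exact List.drop_left
          have hple : i ≤ pre.length := by
            by_contra hcon
            exact hmin pre.length (by omega) ⟨d, by simpa using hdropp.symm⟩
          rcases Nat.eq_or_lt_of_le hple with heq | hlt2
          · refine ⟨d, hd, Or.inl ?_⟩
            rw [← heq, hdi] at hdropp
            have hrd : r = d := by injection hdropp
            rw [← hrd, hr']
          · refine ⟨d, hd, Or.inr ?_⟩
            have hdd : (s.drop (i + 1)).drop (pre.length - (i + 1)) = '.' :: d := by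
              rw [List.drop_drop]
              rw [show i + 1 + (pre.length - (i + 1)) = pre.length by omega]
              exact hdropp
            rw [← hdd]
            exact List.drop_suffix _ _

-- A's branch structure computes the same condition
theorem pvA_eq (publisher : String) (he : ¬ publisher = "") (hdrop : ¬ publisher ∈ pvDropSet) :
    classify_publisher_tier publisher
      = if ∃ d ∈ pvTier2Chars, publisher.toList = d ∨ ('.' :: d) <:+ publisher.toList
        then 2 else 3 := by
  unfold classify_publisher_tier
  rw [if_neg he, if_neg hdrop]
  by_cases hex : publisher ∈ pvTier2Set
  · have hc : ∃ d ∈ pvTier2Chars, publisher.toList = d ∨ ('.' :: d) <:+ publisher.toList := by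
      refine ⟨publisher.toList, ?_, Or.inl rfl⟩
      have : publisher ∈ pvTier2List := (PySem.Set.mem_ofList _ _).mp hex
      exact List.mem_map_of_mem this
    rw [if_pos hex, if_pos hc]
  · rw [if_neg hex]
    have hnotexact : publisher.toList ∉ pvTier2Chars := by
      intro hcc
      obtain ⟨e, he2, he3⟩ := List.mem_map.mp hcc
      exact hex ((PySem.Set.mem_ofList _ _).mpr (String.toList_inj.mp he3.symm ▸ he2))
    by_cases hany : pvTier2List.any (fun d => PySem.Str.endswith publisher ("." ++ d)) = true
    · obtain ⟨d, hd, hsw⟩ := List.any_eq_true.mp hany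
      have hsuf : ('.' :: d.toList) <:+ publisher.toList := by
        have := (PySem.Chars.endswith_iff publisher.toList ("." ++ d).toList).mp
          (by rw [← PySem.Str.endswith_eq]; exact hsw)
        simpa using this
      have hc : ∃ dd ∈ pvTier2Chars, publisher.toList = dd ∨ ('.' :: dd) <:+ publisher.toList :=
        ⟨d.toList, List.mem_map_of_mem hd, Or.inr hsuf⟩
      rw [if_pos hany, if_pos hc]
    · have hne : ∀ e ∈ pvTier2List, ¬ ('.' :: e.toList) <:+ publisher.toList := by
        intro e he2 hs
        refine hany (List.any_eq_true.mpr ⟨e, he2, ?_⟩)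
        rw [PySem.Str.endswith_eq]
        refine (PySem.Chars.endswith_iff _ _).mpr ?_
        simpa using hs
      have hc : ¬ ∃ dd ∈ pvTier2Chars, publisher.toList = dd ∨ ('.' :: dd) <:+ publisher.toList := by
        rintro ⟨dd, hdd, (hdds | hsuf)⟩
        · exact hnotexact (hdds ▸ hdd)
        · obtain ⟨e, he2, rfl⟩ := List.mem_map.mp hdd
          exact hne e he2 hsuf
      rw [if_neg hany, if_neg hc]

-- ===== VERDICT (by name: the statement is the Claim_ definition above) =====
theorem classify_publisher_tier_spec : Claim_equal_classify_publisher_tier := by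
  intro publisher _
  unfold Spec_classify_publisher_tier classify_publisher_tier_alt
  by_cases he : publisher = ""
  · simp [classify_publisher_tier, he]
  · by_cases hdrop : publisher ∈ pvDropSet
    · simp [classify_publisher_tier, he, hdrop]
    · simp only [he, if_false, hdrop]
      rw [pvA_eq publisher he hdrop, pvTier2Suffix_eq]
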